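-- pv_equiv track=rewrite | github.com/alexgravx/prisonner-dilemma | pkg/dilemma_pkg/strategies.py | MajoMou
-- ===== SOURCE A (Python) =====
-- switch = {0: 1, 1: 0}
--
-- def MajoMou(R, i, role = 1):
--     # I play what my opponent has mostly played; at first run or in case of a tie, I cooperate.
--     if i==0:
--         return 'c'
--     elif [R[i][switch[role]] for i in range(len(R))].count('c') > [R[i][switch[role]] for i in range(len(R))].count('t'):
--         return 'c'
--     elif [R[i][switch[role]] for i in range(len(R))].count('c') < [R[i][switch[role]] for i in range(len(R))].count('t'):
--         return 't'
--     else: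
--         return 'c'
-- ===== SOURCE B (Python) =====
-- # One pass with a single signed balance instead of four rebuilt lists and a three-way count comparison (simpler).
-- switch = {0: 1, 1: 0}
--
-- def MajoMou(R, i, role = 1):
--     if i == 0:
--         return 'c'
--     bal = 0
--     for row in R:
--         m = row[switch[role]]
--         if m == 'c':
--             bal += 1
--         elif m == 't':
--             bal -= 1
--     return 'c' if bal >= 0 else 't'
-- ===== Notes on version B (the rewrite author's own statement) =====
-- stated objective: simpler
-- what changed: Replaces the four rebuilt list comprehensions and the three-way count('c')/count('t') comparison with a single pass keeping one signed balance and one threshold test (balance >= 0 means cooperate, covering both strict majority and the tie).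
import Mathlib
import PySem

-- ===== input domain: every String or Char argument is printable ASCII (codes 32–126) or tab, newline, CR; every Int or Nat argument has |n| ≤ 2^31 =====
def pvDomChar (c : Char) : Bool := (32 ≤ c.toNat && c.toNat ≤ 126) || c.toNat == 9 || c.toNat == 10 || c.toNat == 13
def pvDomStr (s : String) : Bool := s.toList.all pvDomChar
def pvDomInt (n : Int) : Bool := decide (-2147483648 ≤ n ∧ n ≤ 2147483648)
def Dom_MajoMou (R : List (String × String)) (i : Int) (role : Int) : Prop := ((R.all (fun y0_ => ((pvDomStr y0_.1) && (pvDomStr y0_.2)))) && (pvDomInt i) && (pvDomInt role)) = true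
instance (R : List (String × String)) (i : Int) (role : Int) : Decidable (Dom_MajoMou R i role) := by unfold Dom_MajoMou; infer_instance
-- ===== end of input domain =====

-- B replaces A's four rebuilt comprehensions and three-way count comparison by a single
-- pass keeping one signed balance and the test balance >= 0 (simpler, same cost).

-- ===== PORT A =====
-- switch = {0:1, 1:0}: under Pre_ (role ∈ {0,1}) the looked-up pair component is
-- row.2 for role = 0 and row.1 for role = 1.
def pvOppMove (role : Int) (row : String × String) : String :=
  if role = 1 then row.1 else row.2

def MajoMou (R : List (String × String)) (i : Int) (role : Int) : String :=
  if i = 0 then "c"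
  else if PySem.List.count (R.map (pvOppMove role)) "c" > PySem.List.count (R.map (pvOppMove role)) "t" then "c"
  else if PySem.List.count (R.map (pvOppMove role)) "c" < PySem.List.count (R.map (pvOppMove role)) "t" then "t"
  else "c"

-- ===== PORT B =====
def MajoMou_alt (R : List (String × String)) (i : Int) (role : Int) : String :=
  if i = 0 then "c"
  else
    let bal : Int := R.foldl (fun b row =>
      let m := pvOppMove role row
      if m = "c" then b + 1 else if m = "t" then b - 1 else b) 0
    if bal ≥ 0 then "c" else "t"

-- ===== PRECONDITION & SPEC =====
-- A raises KeyError (switch[role]) when i ≠ 0, R is nonempty and role ∉ {0,1}; exactly those inputs are excluded.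
def Pre_MajoMou (R : List (String × String)) (i : Int) (role : Int) : Prop :=
  i = 0 ∨ R = [] ∨ role = 0 ∨ role = 1
instance (R : List (String × String)) (i : Int) (role : Int) : Decidable (Pre_MajoMou R i role) := by unfold Pre_MajoMou; infer_instance
def pvWitness_MajoMou : (List (String × String)) × Int × Int := ([("c", "t"), ("t", "t")], 2, 1)

def Spec_MajoMou (R : List (String × String)) (i : Int) (role : Int) (out : String) : Prop := out = MajoMou_alt R i role
instance (R : List (String × String)) (i : Int) (role : Int) (out : String) : Decidable (Spec_MajoMou R i role out) := by unfold Spec_MajoMou; infer_instance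

-- ===== CLAIM (what is proved, stated in full; the proofs are below) =====
def Claim_equal_MajoMou : Prop := ∀ (R : List (String × String)) (i : Int) (role : Int), Dom_MajoMou R i role → Pre_MajoMou R i role → Spec_MajoMou R i role (MajoMou R i role)

-- ===== LEMMAS AND PROOFS =====
-- B's balance is the count of "c" minus the count of "t".
theorem pvBal_eq (xs : List String) (b : Int) :
    xs.foldl (fun b m => if m = "c" then b + 1 else if m = "t" then b - 1 else b) b
      = b + (xs.count "c" : Int) - (xs.count "t" : Int) := by
  induction xs generalizing b with
  | nil => simp
  | cons x xs ih =>
    simp only [List.foldl_cons, List.count_cons, ih]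
    by_cases hc : x = "c" <;> by_cases ht : x = "t" <;>
      simp [hc, ht, beq_iff_eq] <;> omega

theorem MajoMou_spec : Claim_equal_MajoMou := by
  intro R i role _ _
  unfold Spec_MajoMou MajoMou MajoMou_alt
  by_cases hi : i = 0
  · simp [hi]
  · have hfold : (R.foldl (fun b row =>
        let m := pvOppMove role row
        if m = "c" then b + 1 else if m = "t" then b - 1 else b) 0)
        = ((R.map (pvOppMove role)).count "c" : Int) - ((R.map (pvOppMove role)).count "t" : Int) := by
      have e : (R.map (pvOppMove role)).foldl
          (fun (b : Int) m => if m = "c" then b + 1 else if m = "t" then b - 1 else b) 0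
          = R.foldl (fun (b : Int) row =>
              if pvOppMove role row = "c" then b + 1
              else if pvOppMove role row = "t" then b - 1 else b) 0 := List.foldl_map ..
      rw [pvBal_eq] at e
      exact e.symm.trans (by ring)
    simp only [hi, hfold, PySem.List.count]
    split_ifs with h1 h2 h3 h3 <;> try rfl
    · omega
    · omega
    · omega

-- ===== VERDICT (by name: the statement is the Claim_ definition above) =====
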